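-- pv_equiv track=rewrite | github.com/aviswerdlow/k4 | experiments/pipeline_v5_2_1/scripts/run_explore_v5_2_1_pilot.py | apply_anchors
-- ===== SOURCE A (Python) =====
-- ANCHOR_POSITIONS = {
--     "EAST": (21, 24),
--     "NORTHEAST": (25, 33),
--     "BERLIN": (63, 68),
--     "CLOCK": (69, 73)
-- }
--
-- def apply_anchors(head: str) -> str:
--     """Apply anchors at fixed positions."""
--     # Pad to 97 chars
--     full = head + " " * (97 - len(head))
--     chars = list(full[:97])
--
--     # Apply anchors
--     for anchor, (start, end) in ANCHOR_POSITIONS.items():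
--         for i, c in enumerate(anchor):
--             if start + i < len(chars):
--                 chars[start + i] = c
--
--     return ''.join(chars)
-- ===== SOURCE B (Python) =====
-- ANCHOR_POSITIONS = {
--     "EAST": (21, 24),
--     "NORTHEAST": (25, 33),
--     "BERLIN": (63, 68),
--     "CLOCK": (69, 73)
-- }
--
-- def apply_anchors(head: str) -> str:
--     """Apply anchors at fixed positions (slice-and-concatenate)."""
--     full = (head + " " * 97)[:97]
--     return full[:21] + "EASTNORTHEAST" + full[34:63] + "BERLINCLOCK" + full[74:97]
-- ===== Notes on version B (the rewrite author's own statement) =====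
-- stated objective: simpler
-- what changed: A mutates a char list in place with two nested loops over the anchor dict; B exploits that the anchors form two contiguous blocks and builds the result directly as five slice/literal concatenations with no loop at all.
import Mathlib
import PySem

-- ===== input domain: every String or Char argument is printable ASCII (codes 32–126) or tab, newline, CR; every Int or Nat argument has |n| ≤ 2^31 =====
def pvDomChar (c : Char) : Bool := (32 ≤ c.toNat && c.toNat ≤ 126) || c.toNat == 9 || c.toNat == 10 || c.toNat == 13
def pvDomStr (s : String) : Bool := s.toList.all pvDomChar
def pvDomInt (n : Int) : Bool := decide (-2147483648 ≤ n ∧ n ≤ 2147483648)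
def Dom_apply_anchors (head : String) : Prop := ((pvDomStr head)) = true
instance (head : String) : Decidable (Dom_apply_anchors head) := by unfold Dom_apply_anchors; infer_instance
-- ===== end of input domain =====

-- B replaces A's per-character mutation loops over ANCHOR_POSITIONS by direct
-- slice-and-concatenate of the two contiguous anchor blocks (objective: simpler).

-- ===== PORT A =====
-- ANCHOR_POSITIONS as an insertion-ordered association list (anchor chars, (start, end)).
def pvAnchors : List (List Char × Int × Int) :=
  [(['E','A','S','T'], 21, 24), (['N','O','R','T','H','E','A','S','T'], 25, 33),
   (['B','E','R','L','I','N'], 63, 68), (['C','L','O','C','K'], 69, 73)]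

def apply_anchors (head : String) : String :=
  -- full = head + " " * (97 - len(head))  (a negative repeat count yields "")
  let full := head.toList ++ List.replicate ((97 - (head.toList.length : Int)).toNat) ' '
  -- chars = list(full[:97])
  let chars := PySem.List.slice full none (some 97)
  -- for anchor, (start, end) in ANCHOR_POSITIONS.items(): for i, c in enumerate(anchor):
  --   if start + i < len(chars): chars[start + i] = c
  let chars := pvAnchors.foldl (fun cs p =>
    (PySem.List.enumerate p.1 0).foldl (fun cs ic =>
      if p.2.1 + ic.1 < (cs.length : Int) then cs.set (p.2.1 + ic.1).toNat ic.2 else cs) cs) chars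
  String.ofList chars

-- ===== PORT B =====
def apply_anchors_alt (head : String) : String :=
  -- full = (head + " " * 97)[:97]
  let full := PySem.List.slice (head.toList ++ List.replicate 97 ' ') none (some 97)
  -- full[:21] + "EASTNORTHEAST" + full[34:63] + "BERLINCLOCK" + full[74:97]
  String.ofList (PySem.List.slice full none (some 21) ++ "EASTNORTHEAST".toList ++
                 PySem.List.slice full (some 34) (some 63) ++ "BERLINCLOCK".toList ++
                 PySem.List.slice full (some 74) (some 97))

-- ===== PRECONDITION & SPEC =====
def Spec_apply_anchors (head : String) (out : String) : Prop := out = apply_anchors_alt head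
instance (head : String) (out : String) : Decidable (Spec_apply_anchors head out) := by unfold Spec_apply_anchors; infer_instance

-- ===== CLAIM (what is proved, stated in full; the proofs are below) =====
def Claim_equal_apply_anchors : Prop := ∀ (head : String), Dom_apply_anchors head → Spec_apply_anchors head (apply_anchors head)

-- ===== LEMMAS AND PROOFS =====

-- A's inner anchor loop splices `anchor` into `cs` at offset start + j (all in range).
lemma pv_fold (anchor : List Char) (start : Int) (hs : 0 ≤ start) :
    ∀ (j : Int) (cs : List Char), 0 ≤ j →
    start + j + anchor.length ≤ cs.length →
    (PySem.List.enumerate anchor j).foldl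
      (fun cs ic => if start + ic.1 < (cs.length : Int) then cs.set (start + ic.1).toNat ic.2 else cs) cs
    = cs.take (start + j).toNat ++ anchor ++ cs.drop ((start + j).toNat + anchor.length) := by
  induction anchor with
  | nil =>
    intro j cs hj _
    simp [PySem.List.enumerate_nil, List.take_append_drop]
  | cons x rest ih =>
    intro j cs hj hbound
    rw [PySem.List.enumerate_cons, List.foldl_cons]
    have hn : (start + j).toNat < cs.length := by
      simp [List.length_cons] at hbound; omega
    have hguard : start + j < (cs.length : Int) := by
      simp [List.length_cons] at hbound; omega
    rw [if_pos hguard]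
    have hset : cs.set (start + j).toNat x
        = cs.take (start + j).toNat ++ x :: cs.drop ((start + j).toNat + 1) := by
      rw [List.set_eq_take_append_cons_drop, if_pos hn]
    rw [ih (j+1) (cs.set (start + j).toNat x) (by omega)
        (by simp [List.length_cons] at hbound ⊢; omega)]
    rw [hset]
    have hta : (start + (j+1)).toNat = (start + j).toNat + 1 := by omega
    have htl : (cs.take (start + j).toNat).length = (start + j).toNat := by
      simp; omega
    rw [hta]
    rw [List.take_append, List.drop_append]
    simp [htl]
    have h1 : List.take ((start + j).toNat + 1) (List.take (start + j).toNat cs)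
        = List.take (start + j).toNat cs := List.take_of_length_le (by omega)
    have h2 : List.drop ((start + j).toNat + 1 + rest.length) (List.take (start + j).toNat cs)
        = [] := List.drop_eq_nil_of_le (by omega)
    have h3 : (start + j).toNat + 1 + rest.length - (start + j).toNat = rest.length + 1 := by omega
    rw [h1, h2, h3, List.nil_append, List.drop_succ_cons, List.drop_drop]
    have h4 : (start + j).toNat + 1 + rest.length = (start + j).toNat + (rest.length + 1) := by
      omega
    rw [h4]

-- Both ports build the same padded 97-char base list.
lemma pv_base (l : List Char) :
    List.take 97 (l ++ List.replicate ((97 - (l.length : Int)).toNat) ' ')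
      = List.take 97 (l ++ List.replicate 97 ' ') := by
  rw [List.take_append, List.take_append, List.take_replicate, List.take_replicate]
  congr 2
  omega

-- A's whole anchor pass on a 97-char list, in slice form.
lemma pv_main (f : List Char) (hf : f.length = 97) :
    pvAnchors.foldl (fun cs p =>
      (PySem.List.enumerate p.1 0).foldl
        (fun cs ic => if p.2.1 + ic.1 < (cs.length : Int) then cs.set (p.2.1 + ic.1).toNat ic.2 else cs) cs) f
    = f.take 21 ++ "EASTNORTHEAST".toList ++ (f.drop 34).take 29 ++ "BERLINCLOCK".toList ++ f.drop 74 := by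
  simp only [pvAnchors, List.foldl_cons, List.foldl_nil]
  rw [pv_fold ['E','A','S','T'] 21 (by norm_num) 0 f (by norm_num) (by simp [hf])]
  have e1 : ((21:Int) + 0).toNat = 21 := rfl
  have eL : (['E','A','S','T'] : List Char).length = 4 := rfl
  rw [e1, eL]
  set g1 : List Char := List.take 21 f ++ ['E','A','S','T'] ++ List.drop (21+4) f with hg1
  have hg1len : g1.length = 97 := by simp [hg1, hf]
  rw [pv_fold ['N','O','R','T','H','E','A','S','T'] 25 (by norm_num) 0 g1 (by norm_num) (by rw [hg1len]; norm_num)]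
  have e2 : ((25:Int) + 0).toNat = 25 := rfl
  have eL2 : (['N','O','R','T','H','E','A','S','T'] : List Char).length = 9 := rfl
  rw [e2, eL2]
  set g2 : List Char := List.take 25 g1 ++ ['N','O','R','T','H','E','A','S','T'] ++ List.drop (25+9) g1 with hg2
  have hg2len : g2.length = 97 := by simp [hg2, hg1len]
  rw [pv_fold ['B','E','R','L','I','N'] 63 (by norm_num) 0 g2 (by norm_num) (by rw [hg2len]; norm_num)]
  have e3 : ((63:Int) + 0).toNat = 63 := rfl
  have eL3 : (['B','E','R','L','I','N'] : List Char).length = 6 := rfl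
  rw [e3, eL3]
  set g3 : List Char := List.take 63 g2 ++ ['B','E','R','L','I','N'] ++ List.drop (63+6) g2 with hg3
  have hg3len : g3.length = 97 := by simp [hg3, hg2len]
  rw [pv_fold ['C','L','O','C','K'] 69 (by norm_num) 0 g3 (by norm_num) (by rw [hg3len]; norm_num)]
  have e4 : ((69:Int) + 0).toNat = 69 := rfl
  have eL4 : (['C','L','O','C','K'] : List Char).length = 5 := rfl
  rw [e4, eL4]
  rw [hg3, hg2, hg1]
  simp [List.take_append, List.drop_append, List.drop_drop, hf,
        List.take_of_length_le, List.drop_eq_nil_of_le]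

-- ===== VERDICT (by name: the statement is the Claim_ definition above) =====
theorem apply_anchors_spec : Claim_equal_apply_anchors := by
  intro head _
  unfold Spec_apply_anchors
  simp only [apply_anchors, apply_anchors_alt]
  rw [PySem.List.slice_to _ (by norm_num), PySem.List.slice_to _ (by norm_num)]
  have ht97 : ((97:Int)).toNat = 97 := rfl
  rw [ht97, pv_base head.toList]
  set f : List Char := List.take 97 (head.toList ++ List.replicate 97 ' ') with hfdef
  have hf : f.length = 97 := by simp [hfdef]
  rw [pv_main f hf]
  congr 1
  rw [PySem.List.slice_to _ (by norm_num),
      PySem.List.slice_toNat _ (by norm_num) (by norm_num),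
      PySem.List.slice_toNat _ (by norm_num) (by norm_num)]
  simp only [Int.reduceToNat]
  norm_num
  rw [← hfdef, List.take_of_length_le (show (List.drop 74 f).length ≤ 23 by simp [hf])]
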